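-- pv_equiv track=rewrite | github.com/Theo-Hafsaoui/Licence | L2/L2/I33/tp/partielle/tp.py | table_alpha
-- ===== SOURCE A (Python) =====
-- def multbyalpha(b,f):
--     t = b<<1
--     n = len(bin(f))-3
--     if ((t & (1<<n)) != 0) or (((t & (1<<n)) >> n) ==1) :
--         t = t ^ f
--     return t
--
-- def table_alpha(P):
--     a=bin(P)[2:]
--     L = len(a)
--     d = (1<<L)-1
--     l=[1,2]
--     i,m=2,2
--     while i < d:
--         m=multbyalpha(m,P)
--         if m not in l:
--             l.append(m)
--         i+=1
--     return l
-- ===== SOURCE B (Python) =====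
-- def multbyalpha(b, f):
--     t = b << 1
--     n = len(bin(f)) - 3
--     if ((t & (1 << n)) != 0) or (((t & (1 << n)) >> n) == 1):
--         t = t ^ f
--     return t
--
--
-- def table_alpha(P):
--     # Cycle detection: the iteration m -> multbyalpha(m, P) is deterministic,
--     # so once a value repeats the orbit cycles and no new value can ever
--     # appear.  Stop at the first repeat instead of running all d-2 steps,
--     # tracking visited orbit values in a hash set.
--     d = (1 << (len(bin(P)) - 2)) - 1
--     m = 2
--     seen = {2}
--     out = [1, 2]
--     for _ in range(d - 2):
--         m = multbyalpha(m, P)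
--         if m in seen:
--             break
--         seen.add(m)
--         if m != 1:
--             out.append(m)
--     return out
-- ===== Notes on version B (the rewrite author's own statement) =====
-- stated objective: faster
-- what changed: B replaces A's fixed (d-2)-iteration loop with an inline 'm not in l' list scan by a cycle-detecting loop over a hash set of orbit values that breaks at the first repeated value, which is correct because the iteration m -> multbyalpha(m,P) is deterministic so no new value can appear after a repeat.
import Mathlib
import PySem

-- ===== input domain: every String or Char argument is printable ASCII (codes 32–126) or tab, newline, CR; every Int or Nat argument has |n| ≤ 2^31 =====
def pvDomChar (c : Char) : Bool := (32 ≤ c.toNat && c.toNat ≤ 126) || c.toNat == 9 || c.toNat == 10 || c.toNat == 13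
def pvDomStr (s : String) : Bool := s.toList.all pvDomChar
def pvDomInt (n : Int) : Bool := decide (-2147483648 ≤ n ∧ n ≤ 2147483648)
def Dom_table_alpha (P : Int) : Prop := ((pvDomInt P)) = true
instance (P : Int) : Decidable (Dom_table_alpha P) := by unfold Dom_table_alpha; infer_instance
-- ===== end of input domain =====

-- B replaces A's fixed d-2-step loop with inline list-membership dedup by a
-- cycle-detecting loop that stops at the first repeated orbit value (hash set);
-- correct because the iteration m -> multbyalpha(m,P) is deterministic, so after
-- a repeat no new value can appear (objective: faster, early exit + O(1) membership).


-- ===== PORT A =====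
-- shared helper (Source B defines the identical multbyalpha):
-- n = len(bin(f)) - 3 : Nat subtraction is exact, len(bin(f)) ≥ 3 for every int
def multbyalpha (b f : Int) : Int :=
  let t := b <<< 1
  let n := (PySem.Int.toBinChars0b f).length - 3
  if PySem.Int.band t ((1 : Int) <<< n) ≠ 0 ∨ (PySem.Int.band t ((1 : Int) <<< n)) >>> n = 1 then
    PySem.Int.bxor t f
  else t

-- the while-loop of A: while i < d: m = multbyalpha(m,P); if m not in l: l.append(m); i += 1
def tableAlphaLoop (P d i m : Int) (l : List Int) : List Int :=
  if h : i < d then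
    let m' := multbyalpha m P
    let l' := if m' ∉ l then l ++ [m'] else l
    tableAlphaLoop P d (i + 1) m' l'
  else l
termination_by (d - i).toNat
decreasing_by omega

def table_alpha (P : Int) : List Int :=
  let a := PySem.List.slice (PySem.Int.toBinChars0b P) (some 2) none
  let L := a.length
  let d := ((1 : Int) <<< L) - 1
  tableAlphaLoop P d 2 2 [1, 2]

-- ===== PORT B =====
-- the for-loop of Source B with its break ported as fuel recursion over range(d-2)
def tableAltLoop (P : Int) (fuel : Nat) (m : Int) (seen : PySem.Set Int) (out : List Int) : List Int :=
  match fuel with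
  | 0 => out
  | fuel + 1 =>
    let m' := multbyalpha m P
    if m' ∈ seen then out
    else
      let seen' := PySem.Set.add seen m'
      let out' := if m' ≠ 1 then out ++ [m'] else out
      tableAltLoop P fuel m' seen' out'

def table_alpha_alt (P : Int) : List Int :=
  let d := ((1 : Int) <<< ((PySem.Int.toBinChars0b P).length - 2)) - 1
  tableAltLoop P (d - 2).toNat 2 (PySem.Set.ofList [2]) [1, 2]

-- ===== PRECONDITION & SPEC =====
def Spec_table_alpha (P : Int) (out : List Int) : Prop := out = table_alpha_alt P
instance (P : Int) (out : List Int) : Decidable (Spec_table_alpha P out) := by unfold Spec_table_alpha; infer_instance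

-- ===== CLAIM =====
def Claim_equal_table_alpha : Prop := ∀ (P : Int), Dom_table_alpha P → Spec_table_alpha P (table_alpha P)

-- ===== LEMMAS AND PROOFS =====

-- the orbit of 2 under m -> multbyalpha(m, P)
def orbit (P : Int) : Nat → Int
  | 0 => 2
  | k + 1 => multbyalpha (orbit P k) P

-- once the orbit repeats, it stays inside the values already seen
lemma orbit_closed (P : Int) (k : Nat)
    (h : ∃ j ≤ k, orbit P (k + 1) = orbit P j) :
    ∀ n, ∃ j ≤ k, orbit P n = orbit P j := by
  intro n
  induction n with
  | zero => exact ⟨0, Nat.zero_le _, rfl⟩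
  | succ n ih =>
    obtain ⟨j, hj, hje⟩ := ih
    by_cases hjk : j = k
    · obtain ⟨j', hj', hje'⟩ := h
      exact ⟨j', hj', by rw [orbit, hje, hjk, ← orbit, hje']⟩
    · exact ⟨j + 1, by omega, by rw [orbit, hje, ← orbit]⟩

-- A's loop appends nothing once every orbit value is already in l
lemma loop_noop (P d : Int) :
    ∀ (fuel : Nat) (i : Int) (k : Nat) (l : List Int),
      (d - i).toNat = fuel →
      (∀ n, orbit P n ∈ l) →
      tableAlphaLoop P d i (orbit P k) l = l := by
  intro fuel
  induction fuel with
  | zero =>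
    intro i k l hf _
    rw [tableAlphaLoop]
    simp only [dif_neg (by omega : ¬ i < d)]
  | succ fuel ih =>
    intro i k l hf hall
    rw [tableAlphaLoop]
    simp only [dif_pos (by omega : i < d)]
    have hm : multbyalpha (orbit P k) P = orbit P (k + 1) := rfl
    rw [hm, if_neg (by simpa using hall (k + 1))]
    exact ih (i + 1) (k + 1) l (by omega) hall

-- lockstep: A's loop (inline list membership) = B's loop (seen-set with break),
-- given that seen is exactly the orbit prefix and l's members are seen ∪ {1}
lemma lockstep (P d : Int) :
    ∀ (fuel : Nat) (i : Int) (k : Nat) (seen : PySem.Set Int) (l : List Int),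
      (d - i).toNat = fuel →
      (∀ x, x ∈ seen ↔ ∃ j ≤ k, orbit P j = x) →
      (∀ x, x ∈ l ↔ x = 1 ∨ x ∈ seen) →
      tableAlphaLoop P d i (orbit P k) l = tableAltLoop P fuel (orbit P k) seen l := by
  intro fuel
  induction fuel with
  | zero =>
    intro i k seen l hf _ _
    rw [tableAlphaLoop, tableAltLoop]
    simp only [dif_neg (by omega : ¬ i < d)]
  | succ fuel ih =>
    intro i k seen l hf hseen hl
    rw [tableAlphaLoop, tableAltLoop]
    simp only [dif_pos (by omega : i < d)]
    have hm : multbyalpha (orbit P k) P = orbit P (k + 1) := rfl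
    rw [hm]
    by_cases hmem : orbit P (k + 1) ∈ seen
    · -- break: B stops; A keeps looping but never appends again
      rw [if_pos hmem]
      have hcl : ∀ n, ∃ j ≤ k, orbit P n = orbit P j :=
        orbit_closed P k (by obtain ⟨j, hj, hje⟩ := (hseen _).1 hmem; exact ⟨j, hj, hje.symm⟩)
      have hall : ∀ n, orbit P n ∈ l := by
        intro n
        obtain ⟨j, hj, hje⟩ := hcl n
        exact (hl _).2 (Or.inr ((hseen _).2 ⟨j, hj, hje.symm⟩))
      have hin : ¬ orbit P (k + 1) ∉ l := by
        simp only [not_not]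
        exact hall (k + 1)
      rw [if_neg hin]
      exact loop_noop P d fuel (i + 1) (k + 1) l (by omega) hall
    · rw [if_neg hmem]
      have hseen' : ∀ x, x ∈ PySem.Set.add seen (orbit P (k + 1)) ↔ ∃ j ≤ k + 1, orbit P j = x := by
        intro x
        rw [PySem.Set.mem_add, hseen]
        constructor
        · rintro (⟨j, hj, hje⟩ | hx)
          · exact ⟨j, by omega, hje⟩
          · exact ⟨k + 1, le_refl _, hx.symm⟩
        · rintro ⟨j, hj, hje⟩
          by_cases hjk : j = k + 1
          · exact Or.inr (by rw [← hje, hjk])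
          · exact Or.inl ⟨j, by omega, hje⟩
      by_cases hone : orbit P (k + 1) = 1
      · -- m' = 1: already in l (as 1), neither side appends
        have h1l : (1 : Int) ∈ l := (hl 1).2 (Or.inl rfl)
        rw [if_neg (by rw [hone]; simp only [not_not]; exact h1l), if_neg (by simp [hone])]
        refine ih (i + 1) (k + 1) _ l (by omega) hseen' ?_
        intro x
        rw [hl, PySem.Set.mem_add, hone]
        tauto
      · -- m' ∉ l: both sides append m'
        have hnl : orbit P (k + 1) ∉ l := by
          rw [hl]; tauto
        rw [if_pos hone, if_pos hnl]
        refine ih (i + 1) (k + 1) _ (l ++ [orbit P (k + 1)]) (by omega) hseen' ?_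
        intro x
        rw [List.mem_append, List.mem_singleton, hl, PySem.Set.mem_add]
        tauto

theorem table_alpha_eq (P : Int) : table_alpha P = table_alpha_alt P := by
  have hlen : (PySem.List.slice (PySem.Int.toBinChars0b P) (some 2) none).length =
      (PySem.Int.toBinChars0b P).length - 2 := by
    simp [pysem]
  show tableAlphaLoop P (((1 : Int) <<< (PySem.List.slice (PySem.Int.toBinChars0b P) (some 2) none).length) - 1) 2 (orbit P 0) [1, 2] =
    tableAltLoop P (((((1 : Int) <<< ((PySem.Int.toBinChars0b P).length - 2)) - 1) - 2)).toNat (orbit P 0) (PySem.Set.ofList [2]) [1, 2]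
  rw [hlen]
  refine lockstep P _ _ 2 0 (PySem.Set.ofList [2]) [1, 2] rfl ?_ ?_
  · intro x
    simp only [PySem.Set.mem_ofList, List.mem_singleton]
    constructor
    · rintro rfl
      exact ⟨0, le_refl _, rfl⟩
    · rintro ⟨j, hj, hje⟩
      obtain rfl : j = 0 := Nat.le_zero.mp hj
      exact hje.symm
  · intro x
    simp only [PySem.Set.mem_ofList, List.mem_cons, List.not_mem_nil, or_false]

-- ===== VERDICT =====
theorem table_alpha_spec : Claim_equal_table_alpha := by
  intro P _
  unfold Spec_table_alpha
  exact table_alpha_eq P
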